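-- pv_equiv track=rewrite | github.com/dudupo/HUJIHACK | Task1/build/task1/src/strong.py | hash_strings
-- ===== SOURCE A (Python) =====
-- def hash_strings(featuers, _list):
--     ret = 0
--     base = 1
--     for featuer in featuers:
--         if featuer in _list:
--             ret += base
--         base *= 10
--     return ret
-- ===== SOURCE B (Python) =====
-- def hash_strings(featuers, _list):
--     members = set(_list)
--
--     def go(xs):
--         if not xs:
--             return 0
--         if len(xs) == 1:
--             return 1 if xs[0] in members else 0
--         mid = len(xs) // 2
--         return go(xs[:mid]) + 10 ** mid * go(xs[mid:])
--
--     return go(list(featuers))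
-- ===== Notes on version B (the rewrite author's own statement) =====
-- stated objective: alternative
-- what changed: Replaces the single left-to-right loop with a running ret/base accumulator by a divide-and-conquer recursion: split the feature list in half, hash each half independently, and combine as left + 10**mid * right, with membership tested against a set built once.
import Mathlib
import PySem

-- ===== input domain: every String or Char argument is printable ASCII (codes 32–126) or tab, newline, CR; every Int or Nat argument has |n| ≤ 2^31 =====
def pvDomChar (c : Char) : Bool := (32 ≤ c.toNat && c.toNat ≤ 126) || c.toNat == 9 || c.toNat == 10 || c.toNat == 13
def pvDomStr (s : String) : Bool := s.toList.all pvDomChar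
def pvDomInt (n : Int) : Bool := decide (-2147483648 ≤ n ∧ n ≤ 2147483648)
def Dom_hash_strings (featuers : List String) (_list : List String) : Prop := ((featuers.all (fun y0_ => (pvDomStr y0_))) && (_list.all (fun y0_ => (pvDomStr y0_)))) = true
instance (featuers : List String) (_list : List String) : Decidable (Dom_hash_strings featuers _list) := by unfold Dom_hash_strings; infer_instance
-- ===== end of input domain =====

-- B replaces A's single left-to-right loop with its running ret/base accumulator by a
-- divide-and-conquer recursion (hash both halves, combine as left + 10^mid * right),
-- with membership tested against a set built once (alternative; same return value).

-- ===== PORT A =====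
def hash_strings (featuers : List String) (_list : List String) : Int :=
  (featuers.foldl
    (fun (st : Int × Int) featuer =>
      (if _list.contains featuer then st.1 + st.2 else st.1, st.2 * 10))
    (0, 1)).1

-- ===== PORT B =====
-- go: Source B's inner divide-and-conquer helper.  `len(xs) // 2` is ported as Nat division
-- (exact: len(xs) ≥ 0, positive divisor), `xs[:mid]` / `xs[mid:]` as take/drop (exact for
-- 0 ≤ mid ≤ len), `xs[0]` on the singleton branch is its single element.
def hsGo (members : PySem.Set String) : List String → Int
  | [] => 0
  | [x] => if PySem.Set.contains members x then 1 else 0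
  | x :: y :: rest =>
      let xs := x :: y :: rest
      let mid := xs.length / 2
      hsGo members (xs.take mid) + 10 ^ mid * hsGo members (xs.drop mid)
  termination_by xs => xs.length
  decreasing_by
  · simpa using by omega
  · simpa using by omega

def hash_strings_alt (featuers : List String) (_list : List String) : Int :=
  let members : PySem.Set String := PySem.Set.ofList _list
  hsGo members featuers

-- ===== PRECONDITION & SPEC =====
def Spec_hash_strings (featuers : List String) (_list : List String) (out : Int) : Prop := out = hash_strings_alt featuers _list
instance (featuers : List String) (_list : List String) (out : Int) : Decidable (Spec_hash_strings featuers _list out) := by unfold Spec_hash_strings; infer_instance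

-- ===== CLAIM (what is proved, stated in full; the proofs are below) =====
def Claim_equal_hash_strings : Prop := ∀ (featuers : List String) (_list : List String), Dom_hash_strings featuers _list → Spec_hash_strings featuers _list (hash_strings featuers _list)

-- ===== LEMMAS AND PROOFS =====

-- digit value of the feature list, least-significant digit first (common reference value)
def hsVal (_list : List String) : List String → Int
  | [] => 0
  | x :: xs => (if _list.contains x then 1 else 0) + 10 * hsVal _list xs

theorem hs_fold (_list : List String) :
    ∀ (xs : List String) (r b : Int),
      (xs.foldl
        (fun (st : Int × Int) featuer =>
          (if _list.contains featuer then st.1 + st.2 else st.1, st.2 * 10))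
        (r, b)).1 = r + b * hsVal _list xs := by
  intro xs
  induction xs with
  | nil => intro r b; simp [hsVal]
  | cons x xs ih =>
    intro r b
    simp only [List.foldl_cons, hsVal]
    rw [ih]
    split_ifs <;> ring

theorem hsVal_append (_list : List String) (ys zs : List String) :
    hsVal _list (ys ++ zs) = hsVal _list ys + 10 ^ ys.length * hsVal _list zs := by
  induction ys with
  | nil => simp [hsVal]
  | cons y ys ih =>
    simp only [List.cons_append, hsVal, ih, List.length_cons]
    ring

theorem hsGo_eq (_list : List String) :
    ∀ xs, hsGo (PySem.Set.ofList _list) xs = hsVal _list xs := by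
  have key : ∀ (n : Nat) (xs : List String), xs.length ≤ n →
      hsGo (PySem.Set.ofList _list) xs = hsVal _list xs := by
    intro n
    induction n with
    | zero =>
      intro xs hl
      have : xs = [] := List.eq_nil_of_length_eq_zero (by omega)
      subst this; simp [hsGo, hsVal]
    | succ n ih =>
      intro xs hl
      match xs with
      | [] => simp [hsGo, hsVal]
      | [x] => simp [hsGo, hsVal]
      | x :: y :: rest =>
        rw [hsGo]
        rw [ih _ (by simp only [List.length_take]; simp at hl ⊢; omega),
            ih _ (by simp only [List.length_drop]; simp at hl ⊢; omega)]
        have h := hsVal_append _list ((x :: y :: rest).take ((x :: y :: rest).length / 2))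
          ((x :: y :: rest).drop ((x :: y :: rest).length / 2))
        rw [List.take_append_drop] at h
        rw [h, List.length_take, Nat.min_eq_left (by omega)]
  exact fun xs => key xs.length xs le_rfl

-- ===== VERDICT (by name: the statement is the Claim_ definition above) =====
theorem hash_strings_spec : Claim_equal_hash_strings := by
  intro featuers _list _
  unfold Spec_hash_strings hash_strings hash_strings_alt
  rw [hs_fold _list featuers 0 1, hsGo_eq]
  ring
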